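-- pv_equiv track=rewrite | github.com/MatthewVaccaro/Coding-Challenges | 11-5-20/twoPlayerGame.py | arrThing
-- ===== SOURCE A (Python) =====
-- def arrThing(arr):
--     turn = 'p1'
--     p1 = []
--     p2 = []
--
--     for i in range(len(arr)):
--         if turn == 'p1':
--             p1.append(arr[i])
--             if i == len(arr) - 1:
--                 break
--             if arr[i] != arr[i + 1]:
--                 turn = 'p2'
--         else:
--             p2.append(arr[i])
--             if i == len(arr) - 1:
--                 break
--             if arr[i] != arr[i + 1]:
--                 turn = 'p1'
--
--     if len(p1) > len(p2):
--         return 'Player 1 Won'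
--     else:
--         return 'player 2 Won'
-- ===== SOURCE B (Python) =====
-- def arrThing(arr):
--     # compress the array into maximal runs of equal adjacent values
--     runs = []
--     for x in arr:
--         if runs and runs[-1][0] == x:
--             v, n = runs[-1]
--             runs[-1] = (v, n + 1)
--         else:
--             runs.append((x, 1))
--     # even-indexed runs belong to player 1, odd-indexed to player 2
--     count1 = 0
--     count2 = 0
--     p1_turn = True
--     for _, n in runs:
--         if p1_turn:
--             count1 += n
--         else:
--             count2 += n
--         p1_turn = not p1_turn
--     return 'Player 1 Won' if count1 > count2 else 'player 2 Won'
-- ===== Notes on version B (the rewrite author's own statement) =====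
-- stated objective: alternative
-- what changed: B compresses the array once into maximal runs (value, length) and then alternately sums run lengths to the two players, instead of A's index walk that appends every element to a per-player list and switches player on each neighbour comparison.
import Mathlib
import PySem

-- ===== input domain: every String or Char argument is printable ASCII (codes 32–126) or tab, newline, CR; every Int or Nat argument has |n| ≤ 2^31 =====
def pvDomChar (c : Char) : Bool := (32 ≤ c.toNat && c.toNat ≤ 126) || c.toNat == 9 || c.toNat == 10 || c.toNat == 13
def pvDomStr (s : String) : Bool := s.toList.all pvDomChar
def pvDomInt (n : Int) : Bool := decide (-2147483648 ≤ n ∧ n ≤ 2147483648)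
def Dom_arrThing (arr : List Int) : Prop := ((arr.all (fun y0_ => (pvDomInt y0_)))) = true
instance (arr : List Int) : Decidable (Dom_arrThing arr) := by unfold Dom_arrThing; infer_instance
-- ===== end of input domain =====

-- B regroups the array into maximal runs and alternately sums their lengths; alternative decomposition, same cost.

-- ===== PORT A =====
-- A's index loop over range(len(arr)); arr[i] and arr[i+1] are only read at in-range indices, so getD is exact.
def arrThingGo (arr : List Int) (n i : Nat) (turn : String) (p1 p2 : List Int) :
    List Int × List Int :=
  if _h : i < n then
    if turn = "p1" then
      let p1' := p1 ++ [arr.getD i 0]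
      if i = n - 1 then (p1', p2)
      else if arr.getD i 0 ≠ arr.getD (i+1) 0 then arrThingGo arr n (i+1) "p2" p1' p2
      else arrThingGo arr n (i+1) "p1" p1' p2
    else
      let p2' := p2 ++ [arr.getD i 0]
      if i = n - 1 then (p1, p2')
      else if arr.getD i 0 ≠ arr.getD (i+1) 0 then arrThingGo arr n (i+1) "p1" p1 p2'
      else arrThingGo arr n (i+1) "p2" p1 p2'
  else (p1, p2)
termination_by n - i

def arrThing (arr : List Int) : String :=
  let r := arrThingGo arr arr.length 0 "p1" [] []
  if r.1.length > r.2.length then "Player 1 Won" else "player 2 Won"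

-- ===== PORT B =====
-- one step of Source B's run-compression loop (runs[-1] check / append)
def runStep (rs : List (Int × Nat)) (x : Int) : List (Int × Nat) :=
  match rs.getLast? with
  | some (v, n) => if v = x then rs.dropLast ++ [(v, n + 1)] else rs ++ [(x, 1)]
  | none => rs ++ [(x, 1)]

-- one step of Source B's counting loop (state: count1, count2, p1_turn)
def cntStep (s : Nat × Nat × Bool) (p : Int × Nat) : Nat × Nat × Bool :=
  if s.2.2 then (s.1 + p.2, s.2.1, false) else (s.1, s.2.1 + p.2, true)

def arrThing_alt (arr : List Int) : String :=
  let runs := arr.foldl runStep []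
  let c := runs.foldl cntStep (0, 0, true)
  if c.1 > c.2.1 then "Player 1 Won" else "player 2 Won"

-- ===== PRECONDITION & SPEC =====
def Spec_arrThing (arr : List Int) (out : String) : Prop := out = arrThing_alt arr
instance (arr : List Int) (out : String) : Decidable (Spec_arrThing arr out) := by unfold Spec_arrThing; infer_instance

-- ===== CLAIM (what is proved, stated in full; the proofs are below) =====
def Claim_equal_arrThing : Prop := ∀ (arr : List Int), Dom_arrThing arr → Spec_arrThing arr (arrThing arr)

-- ===== LEMMAS AND PROOFS =====

-- proof-side run compression, built from the front
def frontStep (a : Int) (rs : List (Int × Nat)) : List (Int × Nat) :=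
  match rs with
  | (v, n) :: rest => if v = a then (v, n + 1) :: rest else (a, 1) :: (v, n) :: rest
  | [] => [(a, 1)]

def runsOf (arr : List Int) : List (Int × Nat) := arr.foldr frontStep []

-- alternating sum of run lengths, starting with player `t` (true = player 1)
def altCnt : List (Int × Nat) → Bool → Nat × Nat
  | [], _ => (0, 0)
  | (_, n) :: rs, t =>
      let r := altCnt rs (!t)
      if t then (n + r.1, r.2) else (r.1, n + r.2)

theorem runsOf_cons (x : Int) (t : List Int) : runsOf (x :: t) = frontStep x (runsOf t) := rfl

theorem runsOf_head (y : Int) (t : List Int) :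
    ∃ k rest, runsOf (y :: t) = (y, k) :: rest := by
  rw [runsOf_cons]
  cases h : runsOf t with
  | nil => exact ⟨1, [], rfl⟩
  | cons p rest =>
    obtain ⟨v, n⟩ := p
    by_cases hv : v = y
    · subst hv; exact ⟨n + 1, rest, by simp [frontStep]⟩
    · exact ⟨1, (v, n) :: rest, by simp [frontStep, hv]⟩

theorem runStep_nonempty (rs : List (Int × Nat)) (x : Int) : runStep rs x ≠ [] := by
  unfold runStep
  cases h : rs.getLast? with
  | none => simp
  | some p => obtain ⟨v, n⟩ := p; by_cases hv : v = x <;> simp [hv]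

theorem runStep_cons_cons (v : Int) (n : Nat) (q : Int × Nat) (rest : List (Int × Nat)) (x : Int) :
    runStep ((v, n) :: q :: rest) x = (v, n) :: runStep (q :: rest) x := by
  unfold runStep
  rw [List.getLast?_cons_cons]
  cases hg : (q :: rest).getLast? with
  | none => simp at hg
  | some p =>
    obtain ⟨w, m⟩ := p
    by_cases hw : w = x <;> simp [hw, List.dropLast_cons₂]

-- the front step commutes with the back step runStep
theorem runStep_front_comm (a : Int) (rs : List (Int × Nat)) (x : Int) :
    runStep (frontStep a rs) x = frontStep a (runStep rs x) := by
  match rs with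
  | [] =>
    by_cases hx : x = a
    · subst hx; simp [runStep, frontStep]
    · simp [runStep, frontStep, hx, Ne.symm hx]
  | [(v, n)] =>
    by_cases hv : v = a
    · subst hv
      by_cases hx : v = x
      · subst hx; simp [runStep, frontStep]
      · simp [runStep, frontStep, hx]
    · by_cases hx : v = x
      · subst hx; simp [runStep, frontStep, hv]
      · by_cases hxa : x = a
        · subst hxa; simp [runStep, frontStep, hv]
        · simp [runStep, frontStep, hv, hx]
  | (v, n) :: q :: rest =>
    have hne2 : runStep (q :: rest) x ≠ [] := runStep_nonempty _ _
    by_cases hv : v = a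
    · subst hv
      rw [show frontStep v ((v, n) :: q :: rest) = (v, n + 1) :: q :: rest by simp [frontStep]]
      rw [runStep_cons_cons, runStep_cons_cons]
      simp [frontStep]
    · rw [show frontStep a ((v, n) :: q :: rest) = (a, 1) :: (v, n) :: q :: rest by simp [frontStep, hv]]
      rw [runStep_cons_cons, runStep_cons_cons]
      simp [frontStep, hv]

theorem runsOf_snoc (xs : List Int) (x : Int) :
    runsOf (xs ++ [x]) = runStep (runsOf xs) x := by
  induction xs with
  | nil => simp [runsOf, runStep, frontStep]
  | cons a t ih =>
    rw [List.cons_append, runsOf_cons, ih, runsOf_cons, runStep_front_comm]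

theorem foldl_runStep_eq_runsOf (arr : List Int) :
    arr.foldl runStep [] = runsOf arr := by
  induction arr using List.reverseRecOn with
  | nil => rfl
  | append_singleton xs x ih =>
    rw [List.foldl_append, List.foldl_cons, List.foldl_nil, ih, runsOf_snoc]

theorem foldl_cntStep (runs : List (Int × Nat)) :
    ∀ (a b : Nat) (t : Bool),
      (runs.foldl cntStep (a, b, t)).1 = a + (altCnt runs t).1 ∧
      (runs.foldl cntStep (a, b, t)).2.1 = b + (altCnt runs t).2 := by
  induction runs with
  | nil => intro a b t; simp [altCnt]
  | cons p rs ih =>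
    intro a b t
    obtain ⟨v, n⟩ := p
    cases t with
    | true =>
      simpa [cntStep, altCnt, Nat.add_assoc, Nat.add_comm, Nat.add_left_comm] using ih (a + n) b false
    | false =>
      simpa [cntStep, altCnt, Nat.add_assoc, Nat.add_comm, Nat.add_left_comm] using ih a (b + n) true

theorem getD_of_drop (arr : List Int) (i : Nat) (x : Int) (t : List Int)
    (h : arr.drop i = x :: t) : arr.getD i 0 = x := by
  have h2 : (arr.drop i)[0]? = arr[i + 0]? := List.getElem?_drop
  rw [h] at h2
  simp only [Nat.add_zero] at h2
  simp [List.getD, ← h2]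

-- main invariant of A's loop: its two lists' lengths grow by the alternating run-sum of the remaining suffix
theorem go_len (s : List Int) :
    ∀ (arr : List Int) (i : Nat) (tb : Bool) (p1 p2 : List Int),
      arr.drop i = s → i + s.length = arr.length →
      (arrThingGo arr arr.length i (if tb then "p1" else "p2") p1 p2).1.length
        = p1.length + (altCnt (runsOf s) tb).1 ∧
      (arrThingGo arr arr.length i (if tb then "p1" else "p2") p1 p2).2.length
        = p2.length + (altCnt (runsOf s) tb).2 := by
  induction s with
  | nil =>
    intro arr i tb p1 p2 hdrop hlen
    have hi : ¬ i < arr.length := by simp at hlen; omega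
    rw [arrThingGo]
    simp [hi, runsOf, altCnt]
  | cons x t ih =>
    intro arr i tb p1 p2 hdrop hlen
    have hi : i < arr.length := by simp at hlen; omega
    have hx : arr.getD i 0 = x := getD_of_drop arr i x t hdrop
    rw [arrThingGo]
    simp only [dif_pos hi]
    cases t with
    | nil =>
      have hlast : i = arr.length - 1 := by simp at hlen; omega
      cases tb with
      | true => simp [hlast, runsOf, frontStep, altCnt]
      | false => simp [hlast, runsOf, frontStep, altCnt]
    | cons y t' =>
      have hnl : ¬ i = arr.length - 1 := by simp at hlen; omega
      have hdrop' : arr.drop (i + 1) = y :: t' := by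
        have h1 : arr.drop (i + 1) = (arr.drop i).drop 1 := by
          rw [List.drop_drop, Nat.add_comm]
        rw [h1, hdrop]; rfl
      have hlen' : i + 1 + (y :: t').length = arr.length := by simp at hlen ⊢; omega
      have hy : arr.getD (i + 1) 0 = y := getD_of_drop arr (i + 1) y t' hdrop'
      obtain ⟨k, rest, hk⟩ := runsOf_head y t'
      by_cases hxy : x = y
      · -- equal neighbours: same player keeps the turn, head run grows by one
        subst hxy
        have hruns : runsOf (x :: x :: t') = (x, k + 1) :: rest := by
          rw [runsOf_cons, hk]; simp [frontStep]
        cases tb with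
        | true =>
          have H := ih arr (i + 1) true (p1 ++ [arr.getD i 0]) p2 hdrop' hlen'
          rw [show (if (true = true) then "p1" else "p2") = "p1" from rfl, hx] at H
          rw [show (if (true = true) then "p1" else "p2") = "p1" from rfl]
          rw [if_pos rfl, if_neg hnl, hx, hy, if_neg (show ¬ x ≠ x by simp)]
          refine ⟨?_, ?_⟩
          · rw [H.1, hruns, hk]; simp [altCnt]; omega
          · rw [H.2, hruns, hk]; simp [altCnt]
        | false =>
          have H := ih arr (i + 1) false p1 (p2 ++ [arr.getD i 0]) hdrop' hlen'
          rw [show (if (false = true) then "p1" else "p2") = "p2" from rfl, hx] at H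
          rw [show (if (false = true) then "p1" else "p2") = "p2" from rfl]
          rw [if_neg (show ¬ ("p2" = "p1") by decide), if_neg hnl, hx, hy, if_neg (show ¬ x ≠ x by simp)]
          refine ⟨?_, ?_⟩
          · rw [H.1, hruns, hk]; simp [altCnt]
          · rw [H.2, hruns, hk]; simp [altCnt]; omega
      · -- a change: the turn flips, a fresh run of length one sits in front
        have hruns : runsOf (x :: y :: t') = (x, 1) :: (y, k) :: rest := by
          rw [runsOf_cons, hk]; simp [frontStep, Ne.symm hxy]
        cases tb with
        | true =>
          have H := ih arr (i + 1) false (p1 ++ [arr.getD i 0]) p2 hdrop' hlen'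
          rw [show (if (false = true) then "p1" else "p2") = "p2" from rfl, hx] at H
          rw [show (if (true = true) then "p1" else "p2") = "p1" from rfl]
          rw [if_pos rfl, if_neg hnl, hx, hy, if_pos hxy]
          refine ⟨?_, ?_⟩
          · rw [H.1, hruns, hk]; simp [altCnt]; omega
          · rw [H.2, hruns, hk]; simp [altCnt]
        | false =>
          have H := ih arr (i + 1) true p1 (p2 ++ [arr.getD i 0]) hdrop' hlen'
          rw [show (if (true = true) then "p1" else "p2") = "p1" from rfl, hx] at H
          rw [show (if (false = true) then "p1" else "p2") = "p2" from rfl]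
          rw [if_neg (show ¬ ("p2" = "p1") by decide), if_neg hnl, hx, hy, if_pos hxy]
          refine ⟨?_, ?_⟩
          · rw [H.1, hruns, hk]; simp [altCnt]
          · rw [H.2, hruns, hk]; simp [altCnt]; omega

-- ===== VERDICT (by name: the statement is the Claim_ definition above) =====
theorem arrThing_spec : Claim_equal_arrThing := by
  intro arr _
  unfold Spec_arrThing arrThing arrThing_alt
  have h := go_len arr arr 0 true [] [] (by simp) (by simp)
  rw [show (if (true = true) then "p1" else "p2") = "p1" from rfl] at h
  rw [foldl_runStep_eq_runsOf]
  have hc := foldl_cntStep (runsOf arr) 0 0 true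
  simp only [Nat.zero_add] at hc
  simp [h.1, h.2, hc.1, hc.2]
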